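-- pv_equiv track=rewrite | github.com/wspr-ncsu/visiblev8 | tests/logs/vlp.py | pack_raw_fields
-- ===== SOURCE A (Python) =====
-- def pack_raw_fields(fields):
--     """Pack the strings in the list <fields> into a \\-escaped, :-delimited log record."""
--
--     def xlat(c):
--         if c in ":\\":
--             return "\\" + c
--         elif c < " ":
--             return "\\x{0:02x}".format(ord(c))
--         elif c > "~":
--             return "\\u{0:04x}".format(ord(c))
--         else:
--             return c
--
--     return ":".join("".join(xlat(c) for c in f) for f in fields)
-- ===== SOURCE B (Python) =====
-- def pack_raw_fields(fields):
--     """Pack the strings in the list <fields> into a \\-escaped, :-delimited log record.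
--
--     Alternative algorithm: a precomputed translation table (control chars and
--     ':'/'\\' mapped to their escapes, high codepoints handled by __missing__)
--     applied with str.translate, instead of a per-character classifier loop."""
--
--     class _Table(dict):
--         def __missing__(self, code):
--             if code > 0x7e:
--                 return "\\u{0:04x}".format(code)
--             raise KeyError(code)  # printable ASCII: keep the character as is
--
--     table = _Table()
--     for code in range(0x20):
--         table[code] = "\\x{0:02x}".format(code)
--     table[ord(":")] = "\\:"
--     table[ord("\\")] = "\\\\"
--     return ":".join(f.translate(table) for f in fields)
-- ===== Notes on version B (the rewrite author's own statement) =====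
-- stated objective: alternative
-- what changed: Replaces A's per-character if-chain classifier inside nested generator joins by a translation table built once (control codes and ':'/'\' mapped to their escapes, high codepoints via __missing__) applied with str.translate per field.
import Mathlib
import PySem

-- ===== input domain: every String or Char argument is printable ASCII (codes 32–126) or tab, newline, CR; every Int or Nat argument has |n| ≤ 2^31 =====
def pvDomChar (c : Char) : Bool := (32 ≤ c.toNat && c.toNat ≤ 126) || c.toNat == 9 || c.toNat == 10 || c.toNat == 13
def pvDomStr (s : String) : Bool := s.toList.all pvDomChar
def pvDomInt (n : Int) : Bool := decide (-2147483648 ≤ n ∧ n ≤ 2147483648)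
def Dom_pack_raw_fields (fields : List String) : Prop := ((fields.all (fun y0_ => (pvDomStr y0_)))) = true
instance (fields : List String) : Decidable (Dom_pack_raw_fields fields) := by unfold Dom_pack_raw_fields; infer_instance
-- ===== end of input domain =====

-- B replaces A's per-character if-chain classifier by a translation table built
-- once (controls and ':'/'\\' to escapes, high codepoints via __missing__) and
-- applied with str.translate (objective: alternative).

-- shared helper: '\x{0:02x}' / '\u{0:04x}' formatting of a code point (lowercase hex, zero-padded)
def pvHex (w : Nat) (n : Nat) : List Char :=
  let ds := Nat.toDigits 16 n
  List.replicate (w - ds.length) '0' ++ ds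

-- ===== PORT A =====
def pvXlat (c : Char) : String :=
  if PySem.Chars.isIn [c] [':', '\\'] then String.ofList ['\\', c]
  else if c < ' ' then String.ofList ('\\' :: 'x' :: pvHex 2 c.toNat)
  else if '~' < c then String.ofList ('\\' :: 'u' :: pvHex 4 c.toNat)
  else String.ofList [c]

def pack_raw_fields (fields : List String) : String :=
  PySem.Str.join ":" (fields.map (fun f => PySem.Str.join "" (f.toList.map pvXlat)))

-- ===== PORT B =====
-- the translation table of Source B: codes 0..0x1f to '\xNN', ':' and '\\' to their escapes
def pvTable : PySem.Dict Int String :=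
  (((PySem.List.pyRange 0 32 1).foldl
      (fun (d : PySem.Dict Int String) code =>
        d.insert code (String.ofList ('\\' :: 'x' :: pvHex 2 code.toNat)))
      (PySem.Dict.empty)).insert 58 "\\:").insert 92 "\\\\"

-- one character under str.translate(table): table hit, __missing__ high-codepoint
-- escape, or KeyError = keep the character (exact port of _Table.__missing__)
def pvTrans (c : Char) : String :=
  match pvTable.get? (c.toNat : Int) with
  | some s => s
  | none => if (0x7e : Int) < (c.toNat : Int)
            then String.ofList ('\\' :: 'u' :: pvHex 4 c.toNat)
            else String.ofList [c]

-- f.translate(table) ported as per-character table lookup and concatenation (exact)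
def pack_raw_fields_alt (fields : List String) : String :=
  PySem.Str.join ":" (fields.map (fun f => PySem.Str.join "" (f.toList.map pvTrans)))

-- ===== PRECONDITION & SPEC =====
def Spec_pack_raw_fields (fields : List String) (out : String) : Prop := out = pack_raw_fields_alt fields
instance (fields : List String) (out : String) : Decidable (Spec_pack_raw_fields fields out) := by unfold Spec_pack_raw_fields; infer_instance

-- ===== CLAIM (what is proved, stated in full; the proofs are below) =====
def Claim_equal_pack_raw_fields : Prop := ∀ (fields : List String), Dom_pack_raw_fields fields → Spec_pack_raw_fields fields (pack_raw_fields fields)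

-- ===== LEMMAS AND PROOFS =====

theorem pv_char_toNat_inj (a b : Char) (h : a.toNat = b.toNat) : a = b :=
  Char.ext (UInt32.toNat_inj.mp h)

set_option maxRecDepth 8000 in
-- lookup in the built table, for every code the domain admits
theorem pvTable_lookup : ∀ k : Nat, k < 127 →
    pvTable.get? (k : Int) =
      (if k < 32 then some (String.ofList ('\\' :: 'x' :: pvHex 2 k))
       else if k = 58 then some "\\:"
       else if k = 92 then some "\\\\"
       else none) := by decide

-- the two per-character escapes agree on every character the domain admits
theorem pvXlat_eq_pvTrans (c : Char) (hd : pvDomChar c = true) : pvXlat c = pvTrans c := by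
  have hlt : c.toNat < 127 := by
    unfold pvDomChar at hd
    simp only [Bool.or_eq_true, Bool.and_eq_true, decide_eq_true_eq, beq_iff_eq] at hd
    omega
  have htbl := pvTable_lookup c.toNat hlt
  by_cases h1 : c = ':'
  · subst h1; decide
  by_cases h2 : c = '\\'
  · subst h2; decide
  have hn58 : c.toNat ≠ 58 := fun h => h1 (pv_char_toNat_inj c ':' h)
  have hn92 : c.toNat ≠ 92 := fun h => h2 (pv_char_toNat_inj c '\\' h)
  have hin : PySem.Chars.isIn [c] [':', '\\'] = false := by
    rw [PySem.Chars.isIn_eq_false_iff, List.singleton_infix_iff]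
    simp [h1, h2]
  have hclt : (c < ' ') ↔ c.toNat < 32 := by
    rw [Char.lt_def, UInt32.lt_iff_toNat_lt]
    exact Iff.rfl
  have hchi : ¬ ('~' < c) := by
    rw [Char.lt_def, UInt32.lt_iff_toNat_lt]
    change ¬ (126 < c.toNat)
    omega
  have hihi : ¬ ((0x7e : Int) < (c.toNat : Int)) := by omega
  unfold pvXlat pvTrans
  rw [htbl]
  simp only [hin, Bool.false_eq_true, if_false]
  by_cases hlo : c.toNat < 32
  · simp [hclt, hlo]
  · simp [hclt, hlo, hn58, hn92, hchi, hihi]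

-- ===== VERDICT (by name: the statement is the Claim_ definition above) =====
theorem pack_raw_fields_spec : Claim_equal_pack_raw_fields := by
  intro fields hdom
  unfold Spec_pack_raw_fields pack_raw_fields pack_raw_fields_alt
  congr 1
  apply List.map_congr_left
  intro f hf
  congr 1
  apply List.map_congr_left
  intro c hc
  apply pvXlat_eq_pvTrans
  unfold Dom_pack_raw_fields at hdom
  rw [List.all_eq_true] at hdom
  have := hdom f hf
  simp [pvDomStr, List.all_eq_true] at this
  exact this c hc
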